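-- pv_equiv track=rewrite | github.com/dutta/diamondKineticsCoding | dk.py | backSearchContinuityWithinRange
-- ===== SOURCE A (Python) =====
-- def backSearchContinuityWithinRange(data, indexBegin, indexEnd, thresholdLo, thresholdHi, winLength):
--     if(indexBegin < indexEnd): raise ValueError("indexBegin is smaller than the indexEnd")
--     if(-indexEnd + indexBegin < winLength): raise ValueError("winLength is too long for the range")
--     if(thresholdHi < thresholdLo): raise ValueError("thresholdLo is larger than thresholdHi")
--     start = indexBegin
--     found = False
--     while(not found):
--         for y in range(start, start-winLength,-1):
--             if(y < indexEnd): return None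
--             if not (data[y] <= thresholdHi and data[y] >= thresholdLo):
--                 start = y-1
--                 found = False
--                 break
--             else:
--                 found = True
--     return start
-- ===== SOURCE B (Python) =====
-- def backSearchContinuityWithinRange(data, indexBegin, indexEnd, thresholdLo, thresholdHi, winLength):
--     if(indexBegin < indexEnd): raise ValueError("indexBegin is smaller than the indexEnd")
--     if(-indexEnd + indexBegin < winLength): raise ValueError("winLength is too long for the range")
--     if(thresholdHi < thresholdLo): raise ValueError("thresholdLo is larger than thresholdHi")
--     count = 0
--     for i in range(indexBegin, indexEnd - 1, -1):
--         if thresholdLo <= data[i] <= thresholdHi: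
--             count += 1
--         else:
--             count = 0
--         if count == winLength:
--             return i + winLength - 1
--     return None
-- ===== Notes on version B (the rewrite author's own statement) =====
-- stated objective: simpler
-- what changed: Replaces A's restartable while-loop with an inner fixed-size window re-scan (restart pointer, found flag) by a single backward pass that keeps one consecutive-in-range counter and returns i+winLength-1 the moment the counter reaches winLength.
-- outside the precondition, e.g. on backSearchContinuityWithinRange([5], 0, -3, 0, 10, 1): A returns 0, B returns 0
import Mathlib
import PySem

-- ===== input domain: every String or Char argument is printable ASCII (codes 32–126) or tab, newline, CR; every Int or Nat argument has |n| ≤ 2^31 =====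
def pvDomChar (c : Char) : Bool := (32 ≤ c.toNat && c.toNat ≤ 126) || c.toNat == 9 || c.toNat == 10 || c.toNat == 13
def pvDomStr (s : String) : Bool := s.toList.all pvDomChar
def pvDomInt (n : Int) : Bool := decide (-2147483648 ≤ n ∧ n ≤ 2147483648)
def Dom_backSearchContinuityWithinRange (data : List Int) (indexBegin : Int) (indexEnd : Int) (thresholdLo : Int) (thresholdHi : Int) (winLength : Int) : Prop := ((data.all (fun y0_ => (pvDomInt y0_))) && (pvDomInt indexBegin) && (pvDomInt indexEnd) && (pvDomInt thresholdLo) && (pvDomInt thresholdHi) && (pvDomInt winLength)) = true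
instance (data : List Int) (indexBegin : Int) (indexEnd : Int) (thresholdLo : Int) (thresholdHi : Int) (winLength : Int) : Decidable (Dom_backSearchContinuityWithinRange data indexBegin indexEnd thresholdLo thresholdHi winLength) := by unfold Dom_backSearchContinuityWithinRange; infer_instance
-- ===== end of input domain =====

-- B replaces A's restartable window re-scan (restart pointer + found flag) by one backward
-- pass with a consecutive-in-range counter; equal return value on all inputs admitted by Pre_.

-- ===== PORT A =====
-- Result of one execution of A's inner `for y in range(start, start-winLength, -1)` loop:
-- `ret` = the function returned None, `cont s` = break with `start = s`, `done` = found = True.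
inductive PvInnerRes where
  | ret : PvInnerRes
  | cont : Int → PvInnerRes
  | done : PvInnerRes
deriving DecidableEq

def pvInnerA (data : List Int) (iE lo hi : Int) : Int → Nat → PvInnerRes
  | _, 0 => .done
  | y, k+1 =>
    if y < iE then .ret
    else
      match PySem.List.pyGet? data y with
      | none => .ret  -- IndexError in Python; Pre_ excludes these inputs
      | some v => if v ≤ hi ∧ lo ≤ v then pvInnerA data iE lo hi (y-1) k else .cont (y-1)

-- A's outer `while(not found)` loop; the fuel is only a termination bound (the Python loop
-- has none; under Pre_ the supplied fuel is never exhausted).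
def pvOuterA (data : List Int) (iE lo hi w : Int) : Int → Nat → Option Int
  | _, 0 => none
  | start, f+1 =>
    match pvInnerA data iE lo hi start w.toNat with
    | .ret => none
    | .done => some start
    | .cont s => pvOuterA data iE lo hi w s f

def backSearchContinuityWithinRange (data : List Int) (indexBegin : Int) (indexEnd : Int) (thresholdLo : Int) (thresholdHi : Int) (winLength : Int) : Option Int :=
  if indexBegin < indexEnd then none        -- ValueError in Python; Pre_ excludes
  else if -indexEnd + indexBegin < winLength then none  -- ValueError in Python; Pre_ excludes
  else if thresholdHi < thresholdLo then none           -- ValueError in Python; Pre_ excludes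
  else pvOuterA data indexEnd thresholdLo thresholdHi winLength indexBegin ((indexBegin - indexEnd).toNat + 2)

-- ===== PORT B =====
-- B's single backward pass: i runs from indexBegin down to indexEnd, `count` counts the
-- consecutive in-range values ending at i; n is the exact number of remaining iterations.
-- the updated counter after examining data[i] (B's if/else on `thresholdLo <= data[i] <= thresholdHi`)
def pvStep (data : List Int) (lo hi count i : Int) : Int :=
  match PySem.List.pyGet? data i with
  | none => 0  -- IndexError in Python; Pre_ excludes these inputs
  | some v => if lo ≤ v ∧ v ≤ hi then count + 1 else 0

def pvLoopB (data : List Int) (lo hi w : Int) : Int → Int → Nat → Option Int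
  | _, _, 0 => none
  | i, count, n+1 =>
    let c : Int := pvStep data lo hi count i
    if c = w then some (i + w - 1) else pvLoopB data lo hi w (i-1) c n

def backSearchContinuityWithinRange_alt (data : List Int) (indexBegin : Int) (indexEnd : Int) (thresholdLo : Int) (thresholdHi : Int) (winLength : Int) : Option Int :=
  if indexBegin < indexEnd then none
  else if -indexEnd + indexBegin < winLength then none
  else if thresholdHi < thresholdLo then none
  else pvLoopB data thresholdLo thresholdHi winLength indexBegin 0 (indexBegin - indexEnd + 1).toNat

-- ===== PRECONDITION & SPEC =====
-- Pre_ excludes: inputs where a guard raises ValueError; winLength ≤ 0, where A's inner for-loop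
-- is empty and the while loop never terminates; and index bounds (-|data| ≤ indexEnd, indexBegin < |data|)
-- ruling out IndexError — the bound on indexEnd also excludes a few inputs where A happens to
-- return before descending to an out-of-range index (see the cited example).
def Pre_backSearchContinuityWithinRange (data : List Int) (indexBegin : Int) (indexEnd : Int) (thresholdLo : Int) (thresholdHi : Int) (winLength : Int) : Prop :=
  indexEnd ≤ indexBegin ∧ winLength ≤ indexBegin - indexEnd ∧ thresholdLo ≤ thresholdHi ∧
  1 ≤ winLength ∧ -(data.length : Int) ≤ indexEnd ∧ indexBegin < (data.length : Int)
instance (data : List Int) (indexBegin : Int) (indexEnd : Int) (thresholdLo : Int) (thresholdHi : Int) (winLength : Int) : Decidable (Pre_backSearchContinuityWithinRange data indexBegin indexEnd thresholdLo thresholdHi winLength) := by unfold Pre_backSearchContinuityWithinRange; infer_instance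

def pvWitness_backSearchContinuityWithinRange : List Int × Int × Int × Int × Int × Int := ([1, 2, 3], 2, 0, 0, 5, 2)

def Spec_backSearchContinuityWithinRange (data : List Int) (indexBegin : Int) (indexEnd : Int) (thresholdLo : Int) (thresholdHi : Int) (winLength : Int) (out : Option Int) : Prop := out = backSearchContinuityWithinRange_alt data indexBegin indexEnd thresholdLo thresholdHi winLength
instance (data : List Int) (indexBegin : Int) (indexEnd : Int) (thresholdLo : Int) (thresholdHi : Int) (winLength : Int) (out : Option Int) : Decidable (Spec_backSearchContinuityWithinRange data indexBegin indexEnd thresholdLo thresholdHi winLength out) := by unfold Spec_backSearchContinuityWithinRange; infer_instance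

-- ===== CLAIM (what is proved, stated in full; the proofs are below) =====
def Claim_equal_backSearchContinuityWithinRange : Prop := ∀ (data : List Int) (indexBegin : Int) (indexEnd : Int) (thresholdLo : Int) (thresholdHi : Int) (winLength : Int), Dom_backSearchContinuityWithinRange data indexBegin indexEnd thresholdLo thresholdHi winLength → Pre_backSearchContinuityWithinRange data indexBegin indexEnd thresholdLo thresholdHi winLength → Spec_backSearchContinuityWithinRange data indexBegin indexEnd thresholdLo thresholdHi winLength (backSearchContinuityWithinRange data indexBegin indexEnd thresholdLo thresholdHi winLength)

-- ===== LEMMAS AND PROOFS =====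

-- `inR data lo hi j` = the value at index j exists and lies in [lo, hi].
def inR (data : List Int) (lo hi j : Int) : Bool :=
  match PySem.List.pyGet? data j with
  | none => false
  | some v => decide (lo ≤ v) && decide (v ≤ hi)

-- `allRun data lo hi t k` = indices t, t-1, …, t-k+1 are all in range.
def allRun (data : List Int) (lo hi : Int) (t : Int) : Nat → Bool
  | 0 => true
  | k+1 => inR data lo hi t && allRun data lo hi (t-1) k

-- Reference function: the largest window top t (scanning n candidates downward from t)
-- whose window of wk indices is all in range.
def findTop (data : List Int) (lo hi : Int) (wk : Nat) : Int → Nat → Option Int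
  | _, 0 => none
  | t, n+1 => if allRun data lo hi t wk then some t else findTop data lo hi wk (t-1) n

theorem allRun_mem (data : List Int) (lo hi : Int) :
    ∀ (k : Nat) (t : Int) (j : Nat), allRun data lo hi t k = true → j < k →
      inR data lo hi (t - j) = true := by
  intro k
  induction k with
  | zero => intro t j _ hj; omega
  | succ k ih =>
    intro t j h hj
    simp only [allRun, Bool.and_eq_true] at h
    cases j with
    | zero => simpa using h.1
    | succ j =>
      have := ih (t-1) j h.2 (by omega)
      have he : t - 1 - (j : Int) = t - ((j : Nat) + 1 : Nat) := by push_cast; ring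
      rwa [he] at this

theorem allRun_intro (data : List Int) (lo hi : Int) :
    ∀ (k : Nat) (t : Int), (∀ j : Nat, j < k → inR data lo hi (t - j) = true) →
      allRun data lo hi t k = true := by
  intro k
  induction k with
  | zero => intro t _; rfl
  | succ k ih =>
    intro t h
    simp only [allRun, Bool.and_eq_true]
    refine ⟨by simpa using h 0 (by omega), ih (t-1) ?_⟩
    intro j hj
    have := h (j+1) (by omega)
    have he : t - ((j : Nat) + 1 : Nat) = t - 1 - (j : Int) := by push_cast; ring
    rwa [he] at this

theorem allRun_snoc (data : List Int) (lo hi : Int) :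
    ∀ (k : Nat) (t : Int), allRun data lo hi t k = true → inR data lo hi (t - k) = true →
      allRun data lo hi t (k+1) = true := by
  intro k t h1 h2
  apply allRun_intro
  intro j hj
  by_cases hjk : j < k
  · exact allRun_mem data lo hi k t j h1 hjk
  · have : j = k := by omega
    rwa [this]

theorem findTop_skip (data : List Int) (lo hi L : Int) (wk : Nat) :
    ∀ (g : Nat) (t : Int), (∀ d : Nat, d < g → allRun data lo hi (t - d) wk = false) →
      findTop data lo hi wk t (t - L + 1).toNat = findTop data lo hi wk (t - g) (t - g - L + 1).toNat := by
  intro g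
  induction g with
  | zero => intro t _; norm_num
  | succ g ih =>
    intro t h
    have h0 : allRun data lo hi t wk = false := by simpa using h 0 (by omega)
    rcases hn : (t - L + 1).toNat with _ | m
    · have h2 : (t - (g+1:Nat) - L + 1).toNat = 0 := by push_cast; omega
      rw [h2]; rfl
    · show (if allRun data lo hi t wk then some t else findTop data lo hi wk (t-1) m) = _
      rw [h0]
      simp only [Bool.false_eq_true, if_false]
      have hm : m = (t - 1 - L + 1).toNat := by omega
      rw [hm, ih (t-1) (fun d hd => by
        have := h (d+1) (by omega)
        have he : t - 1 - (d : Int) = t - ((d : Nat) + 1 : Nat) := by push_cast; ring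
        rwa [he])]
      congr 1
      · push_cast; ring
      · push_cast; omega

theorem inner_cases (data : List Int) (iE lo hi iB : Int)
    (htot : ∀ j : Int, iE ≤ j → j ≤ iB → (PySem.List.pyGet? data j).isSome = true) :
    ∀ (k : Nat) (y : Int), y ≤ iB →
      (pvInnerA data iE lo hi y k = .done ∧ ∀ j : Nat, j < k → iE ≤ y - j ∧ inR data lo hi (y - j) = true)
      ∨ (pvInnerA data iE lo hi y k = .ret ∧ ∃ j : Nat, j < k ∧ y - j < iE)
      ∨ (∃ j : Nat, pvInnerA data iE lo hi y k = .cont (y - j - 1) ∧ j < k ∧ iE ≤ y - j ∧ inR data lo hi (y - j) = false) := by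
  intro k
  induction k with
  | zero =>
    intro y _
    exact Or.inl ⟨rfl, by intro j hj; omega⟩
  | succ k ih =>
    intro y hy
    simp only [pvInnerA]
    by_cases hlt : y < iE
    · rw [if_pos hlt]
      exact Or.inr (Or.inl ⟨rfl, 0, by omega, by simpa using hlt⟩)
    · rw [if_neg hlt]
      have hs := htot y (by omega) hy
      cases hg : PySem.List.pyGet? data y with
      | none => rw [hg] at hs; simp at hs
      | some v =>
        dsimp only
        have hinr : inR data lo hi y = (decide (lo ≤ v) && decide (v ≤ hi)) := by
          unfold inR; rw [hg]
        by_cases hv : v ≤ hi ∧ lo ≤ v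
        · rw [if_pos hv]
          have hinr' : inR data lo hi y = true := by
            rw [hinr]; simp [hv.1, hv.2]
          rcases ih (y - 1) (by omega) with ⟨hd, hall⟩ | ⟨hr, j, hj, hje⟩ | ⟨j, hc, hj, hj1, hj2⟩
          · refine Or.inl ⟨hd, ?_⟩
            intro j hj
            cases j with
            | zero => exact ⟨by omega, by simpa using hinr'⟩
            | succ j =>
              have := hall j (by omega)
              have he : y - 1 - (j : Int) = y - ((j : Nat) + 1 : Nat) := by push_cast; ring
              rw [he] at this
              exact this
          · refine Or.inr (Or.inl ⟨hr, j + 1, by omega, ?_⟩)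
            have he : y - 1 - (j : Int) = y - ((j : Nat) + 1 : Nat) := by push_cast; ring
            omega
          · refine Or.inr (Or.inr ⟨j + 1, ?_, by omega, by push_cast at hj1 ⊢; omega, ?_⟩)
            · have he : y - ((j : Nat) + 1 : Nat) - 1 = y - 1 - (j : Int) - 1 := by push_cast; ring
              rw [he]; exact hc
            · have he : y - ((j : Nat) + 1 : Nat) = y - 1 - (j : Int) := by push_cast; ring
              rw [he]; exact hj2
        · rw [if_neg hv]
          refine Or.inr (Or.inr ⟨0, by norm_num, by omega, by omega, ?_⟩)
          push_cast
          rw [show y - 0 = y by ring, hinr]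
          have hd : ¬ (lo ≤ v) ∨ ¬ (v ≤ hi) := by tauto
          rcases hd with h | h <;> simp [h]

theorem outerA_eq_findTop (data : List Int) (iE lo hi w iB : Int)
    (htot : ∀ j : Int, iE ≤ j → j ≤ iB → (PySem.List.pyGet? data j).isSome = true)
    (hw : 1 ≤ w) :
    ∀ (f : Nat) (start : Int), start ≤ iB → (start - iE).toNat + 2 ≤ f →
      pvOuterA data iE lo hi w start f = findTop data lo hi w.toNat start (start - (iE + w - 1) + 1).toNat := by
  intro f
  induction f with
  | zero => intro start _ hf; omega
  | succ f ih =>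
    intro start hsb hf
    simp only [pvOuterA]
    rcases inner_cases data iE lo hi iB htot w.toNat start hsb with
      ⟨hd, hall⟩ | ⟨hr, j, hj, hje⟩ | ⟨j, hcj, hj, hj1, hj2⟩
    · rw [hd]
      have hL : iE + w - 1 ≤ start := by
        have := (hall (w.toNat - 1) (by omega)).1
        omega
      have hg : allRun data lo hi start w.toNat = true :=
        allRun_intro data lo hi w.toNat start (fun j hj => (hall j hj).2)
      rcases hn : (start - (iE + w - 1) + 1).toNat with _ | m
      · omega
      · simp only [findTop, hg, if_true]
    · rw [hr]
      have hn : (start - (iE + w - 1) + 1).toNat = 0 := by omega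
      rw [hn]; rfl
    · rw [hcj]
      dsimp only
      have hskip := findTop_skip data lo hi (iE + w - 1) w.toNat (j + 1) start (by
        intro d hd
        cases hcon : allRun data lo hi (start - (d : Int)) w.toNat with
        | false => rfl
        | true =>
          exfalso
          have hmem := allRun_mem data lo hi w.toNat (start - (d : Int)) (j - d) hcon (by omega)
          have he : start - (d : Int) - ((j - d : Nat) : Int) = start - (j : Int) := by omega
          rw [he, hj2] at hmem
          simp at hmem)
      have he1 : start - ((j + 1 : Nat) : Int) = start - (j : Int) - 1 := by omega
      rw [he1] at hskip
      by_cases hsi : iE ≤ start - (j : Int) - 1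
      · have ihs := ih (start - (j : Int) - 1) (by omega) (by omega)
        rw [ihs, hskip]
      · obtain ⟨k, hk⟩ : ∃ k, w.toNat = k + 1 := ⟨w.toNat - 1, by omega⟩
        obtain ⟨f', rfl⟩ : ∃ f', f = f' + 1 := ⟨f - 1, by omega⟩
        rw [hskip, show (start - (j : Int) - 1 - (iE + w - 1) + 1).toNat = 0 by omega]
        simp only [pvOuterA, hk, pvInnerA, if_pos (show start - (j : Int) - 1 < iE by omega)]
        rfl

theorem loopB_eq_findTop (data : List Int) (iE lo hi w iB : Int)
    (htot : ∀ j : Int, iE ≤ j → j ≤ iB → (PySem.List.pyGet? data j).isSome = true)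
    (hw : 1 ≤ w) :
    ∀ (n : Nat) (i c : Int), 0 ≤ c → c < w → i + c ≤ iB →
      allRun data lo hi (i + c) c.toNat = true → n = (i - iE + 1).toNat →
      pvLoopB data lo hi w i c n = findTop data lo hi w.toNat (i + c) (i + c - (iE + w - 1) + 1).toNat := by
  intro n
  induction n with
  | zero =>
    intro i c hc0 hcw hib hrun hn
    rw [show (i + c - (iE + w - 1) + 1).toNat = 0 by omega]
    rfl
  | succ n ih =>
    intro i c hc0 hcw hib hrun hn
    have hiE : iE ≤ i := by omega
    have hs := htot i hiE (by omega)
    simp only [pvLoopB]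
    cases hg : PySem.List.pyGet? data i with
    | none => rw [hg] at hs; simp at hs
    | some v =>
      by_cases hv : lo ≤ v ∧ v ≤ hi
      · rw [show pvStep data lo hi c i = c + 1 from by
          unfold pvStep; rw [hg]; exact if_pos hv]
        have hinr : inR data lo hi i = true := by
          unfold inR; rw [hg]; simp [hv.1, hv.2]
        have hrun' : allRun data lo hi (i + c) (c.toNat + 1) = true := by
          apply allRun_snoc data lo hi c.toNat (i + c) hrun
          rw [show i + c - ((c.toNat : Nat) : Int) = i by omega]
          exact hinr
        by_cases hw2 : c + 1 = w
        · rw [if_pos hw2]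
          rw [show (i + c - (iE + w - 1) + 1).toNat = n + 1 by omega]
          simp only [findTop]
          rw [show w.toNat = c.toNat + 1 by omega, hrun', if_pos rfl]
          congr 1
          omega
        · rw [if_neg hw2]
          have hB := ih (i - 1) (c + 1) (by omega) (by omega) (by omega)
            (by rw [show i - 1 + (c + 1) = i + c by ring, show (c + 1).toNat = c.toNat + 1 by omega]
                exact hrun')
            (by omega)
          rw [show i - 1 + (c + 1) = i + c by ring] at hB
          exact hB
      · rw [show pvStep data lo hi c i = 0 from by
          unfold pvStep; rw [hg]; exact if_neg hv]
        have hinr : inR data lo hi i = false := by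
          unfold inR; rw [hg]
          have hd : ¬ (lo ≤ v) ∨ ¬ (v ≤ hi) := by tauto
          rcases hd with h | h <;> simp [h]
        rw [if_neg (show (0 : Int) ≠ w by omega)]
        have hB := ih (i - 1) 0 le_rfl (by omega) (by omega) (by rw [show i - 1 + 0 = i - 1 by ring]; rfl) (by omega)
        rw [show i - 1 + 0 = i - 1 by ring] at hB
        have hskip := findTop_skip data lo hi (iE + w - 1) w.toNat (c.toNat + 1) (i + c) (by
          intro d hd
          cases hcon : allRun data lo hi (i + c - (d : Int)) w.toNat with
          | false => rfl
          | true =>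
            exfalso
            have hmem := allRun_mem data lo hi w.toNat (i + c - (d : Int)) (c.toNat - d) hcon (by omega)
            have he : i + c - (d : Int) - ((c.toNat - d : Nat) : Int) = i := by omega
            rw [he, hinr] at hmem
            simp at hmem)
        rw [show i + c - ((c.toNat + 1 : Nat) : Int) = i - 1 by omega] at hskip
        rw [hskip, hB]

-- ===== VERDICT (by name: the statement is the Claim_ definition above) =====
theorem backSearchContinuityWithinRange_spec : Claim_equal_backSearchContinuityWithinRange := by
  intro data iB iE lo hi w _ hpre
  obtain ⟨h1, h2, h3, h4, h5, h6⟩ := hpre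
  unfold Spec_backSearchContinuityWithinRange backSearchContinuityWithinRange backSearchContinuityWithinRange_alt
  rw [if_neg (by omega), if_neg (by omega), if_neg (by omega),
      if_neg (by omega), if_neg (by omega), if_neg (by omega)]
  have htot : ∀ j : Int, iE ≤ j → j ≤ iB → (PySem.List.pyGet? data j).isSome = true := by
    intro j hj1 hj2
    cases hg : PySem.List.pyGet? data j with
    | some v => rfl
    | none =>
      rw [PySem.List.pyGet?_eq_none_iff] at hg
      exact absurd (by unfold PySem.Raise.InRange; omega) hg
  rw [outerA_eq_findTop data iE lo hi w iB htot h4 _ iB le_rfl le_rfl,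
      loopB_eq_findTop data iE lo hi w iB htot h4 _ iB 0 le_rfl (by omega) (by omega) rfl rfl]
  rw [show iB + 0 = iB by omega]
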